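-- pv_equiv track=rewrite | github.com/thanhtrnnn/python-pshit | py01034_doichocacchuso.py | mind
-- ===== SOURCE A (Python) =====
-- def mind(s, i):
--     pos = i
--     for j in range(i + 1, len(s)):
--         if s[j] < s[i]:
--             if pos == i:
--                 pos = j
--             elif s[pos] < s[j]:
--                 pos = j
--     if s[pos] < s[i]:
--         return pos
--     return -1
-- ===== SOURCE B (Python) =====
-- def mind(s, i):
--     pivot = s[i]
--     tail = s[i + 1:]
--     cands = [c for c in tail if c < pivot]
--     if not cands:
--         return -1
--     return i + 1 + tail.index(max(cands))
-- ===== Notes on version B (the rewrite author's own statement) =====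
-- stated objective: simpler
-- what changed: A tracks a running best index with nested branch logic in one loop; B decomposes the task into 'take the candidates after i, return -1 if none, else the first index of their maximum' using filter/max/index.
-- outside the precondition, e.g. on mind('abb', -2): A returns 0, B returns -1
import Mathlib
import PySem

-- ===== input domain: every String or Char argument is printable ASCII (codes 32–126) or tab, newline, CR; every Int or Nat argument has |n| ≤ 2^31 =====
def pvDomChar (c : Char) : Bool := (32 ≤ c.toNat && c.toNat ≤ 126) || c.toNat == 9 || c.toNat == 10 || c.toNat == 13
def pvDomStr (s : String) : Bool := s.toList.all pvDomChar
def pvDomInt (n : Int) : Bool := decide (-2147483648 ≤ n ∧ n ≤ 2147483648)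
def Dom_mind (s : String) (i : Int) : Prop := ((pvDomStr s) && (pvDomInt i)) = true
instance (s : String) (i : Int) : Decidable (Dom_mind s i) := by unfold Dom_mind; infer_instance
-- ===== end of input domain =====

-- B replaces A's single tracking loop (running best index with nested branches) by a
-- filter / max / first-index decomposition; objective: simpler (same O(n) cost).


-- ===== PORT A =====
-- loop body of A's for-loop (s[j] / s[i] / s[pos] as pyGetD; the default is only reachable outside Pre_)
def mindStep (cs : List Char) (i : Int) (pos : Int) (j : Int) : Int :=
  if PySem.List.pyGetD cs j ' ' < PySem.List.pyGetD cs i ' ' then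
    if pos = i then j
    else if PySem.List.pyGetD cs pos ' ' < PySem.List.pyGetD cs j ' ' then j
    else pos
  else pos

def mind (s : String) (i : Int) : Int :=
  let cs := s.toList
  let pos := (PySem.List.pyRange (i + 1) (PySem.List.len cs) 1).foldl (mindStep cs i) i
  if PySem.List.pyGetD cs pos ' ' < PySem.List.pyGetD cs i ' ' then pos else -1

-- ===== PORT B =====
def mind_alt (s : String) (i : Int) : Int :=
  let cs := s.toList
  let pivot := PySem.List.pyGetD cs i ' '
  let tail := PySem.List.slice cs (some (i + 1)) none
  let cands := tail.filter (fun c => c < pivot)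
  match PySem.List.max? cands (fun c => c) with
  | none => -1
  | some m => i + 1 + ((PySem.List.index? tail m).getD 0 : Int)

-- ===== PRECONDITION & SPEC =====
-- Pre_ restricts to the natural domain 0 ≤ i < len(s): for i ≥ len(s) or i < -len(s) A raises
-- IndexError, and for negative in-range i A's range loop reads wrapped negative indices — an
-- accident of Python index wraparound outside the task's natural domain.
def Pre_mind (s : String) (i : Int) : Prop := 0 ≤ i ∧ i < PySem.List.len s.toList
instance (s : String) (i : Int) : Decidable (Pre_mind s i) := by unfold Pre_mind; infer_instance
def pvWitness_mind : String × Int := ("ba", 0)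
def Spec_mind (s : String) (i : Int) (out : Int) : Prop := out = mind_alt s i
instance (s : String) (i : Int) (out : Int) : Decidable (Spec_mind s i out) := by unfold Spec_mind; infer_instance

-- ===== CLAIM (what is proved, stated in full; the proofs are below) =====
def Claim_equal_mind : Prop := ∀ (s : String) (i : Int), Dom_mind s i → Pre_mind s i → Spec_mind s i (mind s i)

-- ===== LEMMAS AND PROOFS =====

-- abstract value of A's loop variable 'pos' after scanning the chars q that follow position i:
-- i while no candidate has been seen, else i+1 + first index (in q) of the maximum candidate
def posOf (i : Int) (c : Char) (q : List Char) : Int :=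
  match PySem.List.max? (q.filter (fun x => x < c)) (fun x => x) with
  | none => i
  | some m => i + 1 + ((PySem.List.index? q m).getD 0 : Int)

lemma getD_mid (pre q : List Char) (k : Nat) (hk : k < q.length) :
    PySem.List.pyGetD (pre ++ q) ((pre.length : Int) + k) ' ' = q[k] := by
  have : ((pre.length : Int) + k) = ((pre.length + k : Nat) : Int) := by push_cast; ring
  rw [this, PySem.List.pyGetD_natCast]
  simp [List.getD, hk]

lemma max?_append_lt (l : List Char) (x : Char) (h : ∀ y ∈ l, y < x) :
    PySem.List.max? (l ++ [x]) (fun y => y) = some x := by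
  cases l with
  | nil => simp [PySem.List.max?_id_cons]
  | cons a t =>
    have hmem := PySem.List.max?_mem (PySem.List.max?_id_cons (x := a) (t := t))
    rw [List.cons_append, PySem.List.max?_id_cons, List.foldl_append]
    simp only [List.foldl]
    rw [max_eq_right (h _ hmem).le]

lemma max?_append_le (l : List Char) (x m : Char)
    (hm : PySem.List.max? l (fun y => y) = some m) (h : x ≤ m) :
    PySem.List.max? (l ++ [x]) (fun y => y) = some m := by
  cases l with
  | nil => simp [PySem.List.max?] at hm
  | cons a t =>
    rw [PySem.List.max?_id_cons] at hm
    injection hm with hm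
    rw [List.cons_append, PySem.List.max?_id_cons, List.foldl_append]
    simp only [List.foldl]
    rw [hm, max_eq_left h]

lemma posOf_step (cs pre p rest : List Char) (x : Char) (i : Int)
    (hpre : (pre.length : Int) = i + 1)
    (hcs : cs = pre ++ p ++ x :: rest) :
    mindStep cs i (posOf i (PySem.List.pyGetD cs i ' ') p) (i + 1 + p.length) =
      posOf i (PySem.List.pyGetD cs i ' ') (p ++ [x]) := by
  set c := PySem.List.pyGetD cs i ' ' with hc
  have hx : PySem.List.pyGetD cs (i + 1 + p.length) ' ' = x := by
    have h1 : cs = pre ++ (p ++ x :: rest) := by simp [hcs]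
    have h2 : (i + 1 + (p.length : Int)) = ((pre.length : Int) + (p.length : Nat)) := by
      rw [hpre]
    rw [h1, h2, getD_mid pre (p ++ x :: rest) p.length (by simp)]
    simp
  by_cases hxc : x < c
  · rcases hfp : p.filter (fun y => decide (y < c)) with _ | ⟨a, t⟩
    · -- no prior candidate: A takes j, B's candidate list becomes [x]
      have hpos : posOf i c p = i := by simp [posOf, hfp, PySem.List.max?]
      have hxnp : x ∉ p := by
        intro hxp
        have : x ∈ p.filter (fun y => decide (y < c)) := by simp [List.mem_filter, hxp, hxc]
        simp [hfp] at this
      have hfilt : (p ++ [x]).filter (fun y => decide (y < c)) = [x] := by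
        simp [List.filter_append, hfp, hxc]
      have hidx : List.idxOf? x (p ++ [x]) = some p.length := by
        rw [← PySem.List.index?_eq_idxOf?]; exact PySem.List.index?_append_singleton_self p x hxnp
      rw [hpos, posOf, hfilt, PySem.List.max?_id_cons]
      simp [mindStep, hx, hxc, hidx, ← hc]
    · -- prior candidate exists with maximum m at first index k
      obtain ⟨m, hmax⟩ : ∃ m, PySem.List.max? (p.filter (fun y => decide (y < c))) (fun y => y) = some m := by
        rw [hfp, PySem.List.max?_id_cons]; exact ⟨_, rfl⟩
      have hmf : m ∈ p.filter (fun y => decide (y < c)) := PySem.List.max?_mem hmax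
      have hmp : m ∈ p := (List.mem_filter.mp hmf).1
      have hmc : m < c := by simpa using (List.mem_filter.mp hmf).2
      obtain ⟨k, hk⟩ : ∃ k, PySem.List.index? p m = some k :=
        Option.isSome_iff_exists.mp ((PySem.List.index?_isSome_iff (xs := p) (v := m)).mpr hmp)
      obtain ⟨hklt, hpk, -⟩ := PySem.List.getElem_of_index?_eq_some hk
      have hk' : List.idxOf? m p = some k := by rw [← PySem.List.index?_eq_idxOf?]; exact hk
      have hpos : posOf i c p = i + 1 + k := by rw [posOf, hmax]; simp [hk']
      have hgetpos : PySem.List.pyGetD cs (i + 1 + k) ' ' = m := by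
        have h1 : cs = pre ++ (p ++ x :: rest) := by simp [hcs]
        have h2 : (i + 1 + (k : Int)) = ((pre.length : Int) + (k : Nat)) := by rw [hpre]
        rw [h1, h2, getD_mid pre (p ++ x :: rest) k (by simp; omega),
            List.getElem_append_left hklt]
        exact hpk
      have hne : (i + 1 + (k : Int)) ≠ i := by omega
      rw [hpos]
      by_cases hmx : m < x
      · -- x becomes the new maximum (and cannot occur earlier)
        have hxnp : x ∉ p := by
          intro hxp
          have hxf : x ∈ p.filter (fun y => decide (y < c)) := by simp [List.mem_filter, hxp, hxc]
          have := PySem.List.max?_isMax hmax _ hxf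
          simp at this; exact absurd hmx (not_lt.mpr this)
        have hfilt : (p ++ [x]).filter (fun y => decide (y < c)) = p.filter (fun y => decide (y < c)) ++ [x] := by
          simp [List.filter_append, hxc]
        have hmax' := max?_append_lt (p.filter (fun y => decide (y < c))) x
          (fun y hy => lt_of_le_of_lt (by simpa using PySem.List.max?_isMax hmax _ hy) hmx)
        have hidx : List.idxOf? x (p ++ [x]) = some p.length := by
          rw [← PySem.List.index?_eq_idxOf?]; exact PySem.List.index?_append_singleton_self p x hxnp
        rw [posOf, hfilt, hmax']
        simp [mindStep, hx, hxc, hne, hgetpos, hmx, hidx, ← hc]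
      · -- A keeps pos; the maximum and its first index are unchanged
        have hfilt : (p ++ [x]).filter (fun y => decide (y < c)) = p.filter (fun y => decide (y < c)) ++ [x] := by
          simp [List.filter_append, hxc]
        have hmax' := max?_append_le (p.filter (fun y => decide (y < c))) x m hmax (le_of_not_gt hmx)
        have hidx : List.idxOf? m (p ++ [x]) = some k := by
          rw [← PySem.List.index?_eq_idxOf?, PySem.List.index?_append_of_mem _ hmp]; exact hk
        rw [posOf, hfilt, hmax']
        simp [mindStep, hx, hxc, hne, hgetpos, hmx, hidx, ← hc]
  · -- x is not a candidate: state and candidate list unchanged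
    have hfilt : (p ++ [x]).filter (fun y => decide (y < c)) = p.filter (fun y => decide (y < c)) := by
      simp [List.filter_append, hxc]
    have hstep : mindStep cs i (posOf i c p) (i + 1 + p.length) = posOf i c p := by
      simp [mindStep, hx, hxc, ← hc]
    rw [hstep, posOf, posOf, hfilt]
    rcases hmax : PySem.List.max? (p.filter (fun y => decide (y < c))) (fun y => y) with _ | m
    · rfl
    · have hmp : m ∈ p := (List.mem_filter.mp (PySem.List.max?_mem hmax)).1
      have : List.idxOf? m (p ++ [x]) = List.idxOf? m p := by
        rw [← PySem.List.index?_eq_idxOf?, ← PySem.List.index?_eq_idxOf?,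
            PySem.List.index?_append_of_mem _ hmp]
      simp [this]

lemma loop_inv (cs pre : List Char) (i : Int) (hpre : (pre.length : Int) = i + 1) :
    ∀ (rest p : List Char), cs = pre ++ p ++ rest →
      (PySem.List.pyRange (i + 1 + p.length) cs.length 1).foldl (mindStep cs i)
          (posOf i (PySem.List.pyGetD cs i ' ') p) =
        posOf i (PySem.List.pyGetD cs i ' ') (p ++ rest) := by
  intro rest
  induction rest with
  | nil =>
    intro p hcs
    have hlen : (cs.length : Int) = i + 1 + p.length := by
      subst hcs; simp; omega
    rw [PySem.List.pyRange_one_eq_nil (by omega)]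
    simp
  | cons x rest' ih =>
    intro p hcs
    have hlen : (i + 1 + (p.length : Int)) < cs.length := by
      subst hcs; simp; omega
    rw [PySem.List.pyRange_one_cons (by exact_mod_cast hlen)]
    simp only [List.foldl_cons]
    rw [posOf_step cs pre p rest' x i hpre hcs]
    have := ih (p ++ [x]) (by simp [hcs])
    simpa [add_assoc] using this

lemma mind_eq_alt_of_pre (s : String) (i : Int) (h : Pre_mind s i) : mind s i = mind_alt s i := by
  obtain ⟨hi0, hilt⟩ := h
  rw [PySem.List.len_eq] at hilt
  set cs := s.toList with hcs
  set c := PySem.List.pyGetD cs i ' ' with hc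
  set pre := cs.take (i + 1).toNat with hpredef
  set tl := cs.drop (i + 1).toNat with htldef
  have hpre_len : (pre.length : Int) = i + 1 := by
    rw [hpredef, List.length_take]
    omega
  have hsplit : cs = pre ++ [] ++ tl := by
    simp [hpredef, htldef]
  have main := loop_inv cs pre i hpre_len tl [] hsplit
  have hpos0 : posOf i c [] = i := by simp [posOf, PySem.List.max?]
  rw [hpos0] at main
  simp only [List.length_nil, Nat.cast_zero, add_zero, List.nil_append] at main
  have htl_slice : PySem.List.slice cs (some (i + 1)) none = tl :=
    PySem.List.slice_from _ (by omega)
  rw [mind, mind_alt]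
  simp only [← hcs, htl_slice, PySem.List.len_eq, ← hc, main]
  rcases hmax : PySem.List.max? (tl.filter (fun y => y < c)) (fun y => y) with _ | m
  · have : posOf i c tl = i := by rw [posOf, hmax]
    rw [this]
    simp [← hc]
  · have hmf := PySem.List.max?_mem hmax
    have hmp : m ∈ tl := (List.mem_filter.mp hmf).1
    have hmc : m < c := by simpa using (List.mem_filter.mp hmf).2
    obtain ⟨k, hk⟩ : ∃ k, PySem.List.index? tl m = some k :=
      Option.isSome_iff_exists.mp ((PySem.List.index?_isSome_iff (xs := tl) (v := m)).mpr hmp)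
    obtain ⟨hklt, htk, -⟩ := PySem.List.getElem_of_index?_eq_some hk
    have hk' : List.idxOf? m tl = some k := by rw [← PySem.List.index?_eq_idxOf?]; exact hk
    have hpos : posOf i c tl = i + 1 + k := by rw [posOf, hmax]; simp [hk']
    have hget : PySem.List.pyGetD cs (i + 1 + k) ' ' = m := by
      have h2 : (i + 1 + (k : Int)) = ((pre.length : Int) + (k : Nat)) := by rw [hpre_len]
      calc PySem.List.pyGetD cs (i + 1 + k) ' '
          = PySem.List.pyGetD (pre ++ tl) ((pre.length : Int) + k) ' ' := by
            rw [← h2]; congr 1; simpa using hsplit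
        _ = tl[k] := getD_mid pre tl k hklt
        _ = m := htk
    rw [hpos, hget, if_pos hmc]
    simp [hk']


-- ===== VERDICT (by name: the statement is the Claim_ definition above) =====
theorem mind_spec : Claim_equal_mind := by
  intro s i _ hpre
  exact mind_eq_alt_of_pre s i hpre
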